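-- pv_equiv track=rewrite | github.com/eeetaF/Pokernator-Generator | poker_calculator.py | clarify_winner
-- ===== SOURCE A (Python) =====
-- def clarify_winner(hands_with_max_combination, combinations):
--     for i in range(5):
--         best_rank = 0
--         hands_with_best_rank = []
--         for j in range(len(hands_with_max_combination)):
--             if combinations[hands_with_max_combination[j]][2][i] % 13 > best_rank:
--                 best_rank = combinations[hands_with_max_combination[j]][2][i] % 13
--                 hands_with_best_rank = [hands_with_max_combination[j]]
--             elif combinations[hands_with_max_combination[j]][2][i] % 13 == best_rank:
--                 hands_with_best_rank.append(hands_with_max_combination[j])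
--         if len(hands_with_best_rank) == 1:
--             return hands_with_best_rank
--         hands_with_max_combination = hands_with_best_rank
--     return hands_with_max_combination
-- ===== SOURCE B (Python) =====
-- def clarify_winner(hands_with_max_combination, combinations):
--     if not hands_with_max_combination:
--         return []
--     keys = [tuple(combinations[h][2][i] % 13 for i in range(5))
--             for h in hands_with_max_combination]
--     best = max(keys)
--     return [h for h, k in zip(hands_with_max_combination, keys) if k == best]
-- ===== Notes on version B (the rewrite author's own statement) =====
-- stated objective: simpler
-- what changed: A narrows the candidate list in five successive best-rank passes with an early return on a unique leader; B builds each hand's 5-rank key once, takes the lexicographic maximum key, and keeps the hands whose key equals it, in input order.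
-- outside the precondition, e.g. on clarify_winner([0, 1], {0: [[], [], [5]], 1: [[], [], [3]]}): A returns [0], B raises IndexError
import Mathlib
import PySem

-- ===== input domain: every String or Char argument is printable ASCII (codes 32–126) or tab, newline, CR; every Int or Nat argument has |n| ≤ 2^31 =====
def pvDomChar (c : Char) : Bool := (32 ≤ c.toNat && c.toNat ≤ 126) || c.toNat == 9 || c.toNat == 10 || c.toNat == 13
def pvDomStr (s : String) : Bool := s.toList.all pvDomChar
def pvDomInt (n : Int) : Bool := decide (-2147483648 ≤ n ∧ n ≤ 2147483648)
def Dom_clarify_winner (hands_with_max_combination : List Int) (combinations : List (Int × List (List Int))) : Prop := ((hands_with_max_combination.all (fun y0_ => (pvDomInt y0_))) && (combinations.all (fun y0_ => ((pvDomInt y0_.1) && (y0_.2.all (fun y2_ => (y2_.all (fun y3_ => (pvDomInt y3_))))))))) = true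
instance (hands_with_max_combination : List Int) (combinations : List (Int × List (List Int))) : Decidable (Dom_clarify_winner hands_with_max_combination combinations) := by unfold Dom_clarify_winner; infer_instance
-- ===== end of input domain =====

-- B replaces A's 5-pass successive narrowing by building each hand's 5-rank key once and
-- filtering on the lexicographic maximum key (objective: simpler; one pass over the hands).

-- ===== PORT A =====
-- shared dict lookup: Python 'combinations[h]' (first match = dict semantics)
def pvLookup (combinations : List (Int × List (List Int))) (h : Int) : Option (List (List Int)) :=
  (PySem.Dict.mk combinations).get? h

-- 'combinations[h][2][i] % 13' (defaults are unreachable under Pre_)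
def pvRankA (combinations : List (Int × List (List Int))) (h i : Int) : Int :=
  PySem.Int.mod (PySem.List.pyGetD (PySem.List.pyGetD ((pvLookup combinations h).getD []) 2 []) i 0) 13

-- the inner 'for j in range(len(hands))' loop: state (best_rank, hands_with_best_rank)
def pvInnerA (combinations : List (Int × List (List Int))) (i : Int) (hands : List Int) : Int × List Int :=
  (PySem.List.pyRange 0 (hands.length : Int) 1).foldl
    (fun st j =>
      if pvRankA combinations (PySem.List.pyGetD hands j 0) i > st.1 then
        (pvRankA combinations (PySem.List.pyGetD hands j 0) i, [PySem.List.pyGetD hands j 0])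
      else if pvRankA combinations (PySem.List.pyGetD hands j 0) i = st.1 then
        (st.1, st.2 ++ [PySem.List.pyGetD hands j 0])
      else st)
    (0, [])

-- the outer 'for i in range(5)' loop with the early return on a unique leader
def pvLoopA (combinations : List (Int × List (List Int))) : Nat → Int → List Int → List Int
  | 0, _, hands => hands
  | f+1, i, hands =>
    let hb := (pvInnerA combinations i hands).2
    if hb.length = 1 then hb else pvLoopA combinations f (i+1) hb

def clarify_winner (hands_with_max_combination : List Int) (combinations : List (Int × List (List Int))) : List Int :=
  pvLoopA combinations 5 0 hands_with_max_combination

-- ===== PORT B =====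
-- the key tuple of a hand: [combinations[h][2][i] % 13 for i in range(5)]
def pvKeyB (combinations : List (Int × List (List Int))) (h : Int) : List Int :=
  (PySem.List.pyRange 0 5 1).map (fun i =>
    PySem.Int.mod (PySem.List.pyGetD (PySem.List.pyGetD ((pvLookup combinations h).getD []) 2 []) i 0) 13)

-- Python's '<' on tuples of ints (lexicographic)
def pvLexLt : List Int → List Int → Bool
  | [], [] => false
  | [], _ :: _ => true
  | _ :: _, [] => false
  | a :: as, b :: bs => if a < b then true else if b < a then false else pvLexLt as bs

def clarify_winner_alt (hands_with_max_combination : List Int) (combinations : List (Int × List (List Int))) : List Int :=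
  let keys := hands_with_max_combination.map (pvKeyB combinations)
  match keys with
  | [] => []
  | k0 :: rest =>
    let best := rest.foldl (fun m k => if pvLexLt m k then k else m) k0
    (hands_with_max_combination.zip keys).filterMap
      (fun hk => if hk.2 = best then some hk.1 else none)

-- ===== PRECONDITION & SPEC =====
def pvOkHand (combinations : List (Int × List (List Int))) (h : Int) : Bool :=
  match pvLookup combinations h with
  | none => false
  | some v =>
    match PySem.List.pyGet? v 2 with
    | none => false
    | some ks => decide (5 ≤ ks.length)

-- Pre_ excludes inputs where Python raises (KeyError on a hand id missing from combinations,
-- IndexError on a row without an index-2 entry or with a kicker list shorter than 5); this also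
-- excludes inputs on which A still RETURNS because its early return on a unique leader stops it
-- before it touches a too-short kicker list, while B always reads all five positions and raises.
def Pre_clarify_winner (hands_with_max_combination : List Int) (combinations : List (Int × List (List Int))) : Prop :=
  hands_with_max_combination.all (pvOkHand combinations) = true

instance (hands_with_max_combination : List Int) (combinations : List (Int × List (List Int))) : Decidable (Pre_clarify_winner hands_with_max_combination combinations) := by
  unfold Pre_clarify_winner; infer_instance

def pvWitness_clarify_winner : List Int × (List (Int × List (List Int))) :=
  ([0, 1], [(0, [[], [], [1, 2, 3, 4, 5]]), (1, [[], [], [1, 2, 3, 4, 6]])])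

def Spec_clarify_winner (hands_with_max_combination : List Int) (combinations : List (Int × List (List Int))) (out : List Int) : Prop := out = clarify_winner_alt hands_with_max_combination combinations
instance (hands_with_max_combination : List Int) (combinations : List (Int × List (List Int))) (out : List Int) : Decidable (Spec_clarify_winner hands_with_max_combination combinations out) := by unfold Spec_clarify_winner; infer_instance

-- ===== CLAIM (what is proved, stated in full; the proofs are below) =====
def Claim_equal_clarify_winner : Prop := ∀ (hands_with_max_combination : List Int) (combinations : List (Int × List (List Int))), Dom_clarify_winner hands_with_max_combination combinations → Pre_clarify_winner hands_with_max_combination combinations → Spec_clarify_winner hands_with_max_combination combinations (clarify_winner hands_with_max_combination combinations)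

-- ===== LEMMAS AND PROOFS =====

-- proof-side view of A's keys: ranks at positions i, i+1, …, i+f-1
def pvKey (combinations : List (Int × List (List Int))) : Nat → Int → Int → List Int
  | 0, _, _ => []
  | f+1, i, h => pvRankA combinations h i :: pvKey combinations f (i+1) h

def pvMax (combinations : List (Int × List (List Int))) (i : Int) (hands : List Int) : Int :=
  hands.foldl (fun m h => max m (pvRankA combinations h i)) 0

def pvMaximal (key : Int → List Int) (l : List Int) (h : Int) : Bool :=
  l.all (fun g => ! pvLexLt (key h) (key g))

theorem pvLexLt_irrefl : ∀ a, pvLexLt a a = false := by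
  intro a; induction a with
  | nil => rfl
  | cons x xs ih => simp [pvLexLt, ih]

theorem pvLexLt_cons_iff (x y : Int) (xs ys : List Int) :
    pvLexLt (x :: xs) (y :: ys) = true ↔ x < y ∨ (x = y ∧ pvLexLt xs ys = true) := by
  simp only [pvLexLt]
  split_ifs with h1 h2
  · simpa using Or.inl h1
  · simp only [false_iff]; push Not; omega
  · have hxy : x = y := by omega
    subst hxy; simp

theorem pvLexLt_trans : ∀ a b c, pvLexLt a b = true → pvLexLt b c = true → pvLexLt a c = true := by
  intro a
  induction a with
  | nil => intro b c hab hbc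
           cases b with
           | nil => simp [pvLexLt] at hab
           | cons y ys => cases c with
             | nil => simp [pvLexLt] at hbc
             | cons z zs => simp [pvLexLt]
  | cons x xs ih =>
    intro b c hab hbc
    cases b with
    | nil => simp [pvLexLt] at hab
    | cons y ys =>
      cases c with
      | nil => simp [pvLexLt] at hbc
      | cons z zs =>
        rw [pvLexLt_cons_iff] at hab hbc ⊢
        rcases hab with h | ⟨he, hr⟩
        · rcases hbc with h2 | ⟨he2, _⟩
          · left; omega
          · left; omega
        · rcases hbc with h2 | ⟨he2, hr2⟩
          · left; omega
          · right; exact ⟨by omega, ih ys zs hr hr2⟩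
theorem pvLexLt_tri : ∀ a b, pvLexLt a b = true ∨ a = b ∨ pvLexLt b a = true := by
  intro a
  induction a with
  | nil => intro b; cases b <;> simp [pvLexLt]
  | cons x xs ih =>
    intro b
    cases b with
    | nil => simp [pvLexLt]
    | cons y ys =>
      rcases lt_trichotomy x y with h | h | h
      · left; simp [pvLexLt, h]
      · subst h
        rcases ih ys with h2 | h2 | h2
        · left; simp [pvLexLt, h2]
        · right; left; simp [h2]
        · right; right; simp [pvLexLt, h2]
      · right; right; simp [pvLexLt, h]

theorem pvRankA_nonneg (c : List (Int × List (List Int))) (h i : Int) : 0 ≤ pvRankA c h i :=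
  PySem.Int.mod_nonneg _ (by norm_num)

-- general fold invariant for the inner loop
theorem pvFoldA (c : List (Int × List (List Int))) (i : Int) :
    ∀ (l : List Int) (b : Int) (acc : List Int),
      l.foldl (fun st h =>
        if pvRankA c h i > st.1 then (pvRankA c h i, [h])
        else if pvRankA c h i = st.1 then (st.1, st.2 ++ [h])
        else st) (b, acc)
      = (l.foldl (fun m h => max m (pvRankA c h i)) b,
         if b < l.foldl (fun m h => max m (pvRankA c h i)) b
         then l.filter (fun h => pvRankA c h i == l.foldl (fun m h => max m (pvRankA c h i)) b)
         else acc ++ l.filter (fun h => pvRankA c h i == b)) := by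
  intro l
  induction l with
  | nil => intro b acc; simp
  | cons h t ih =>
    intro b acc
    simp only [List.foldl_cons]
    have hle : ∀ (b0 : Int), b0 ≤ t.foldl (fun m h => max m (pvRankA c h i)) b0 :=
      fun b0 => (PySem.List.le_foldl_max_int t (fun h => pvRankA c h i) b0).1
    by_cases h1 : pvRankA c h i > b
    · rw [if_pos h1]
      rw [ih]
      have hmax : max b (pvRankA c h i) = pvRankA c h i := by omega
      rw [hmax]
      have hM : pvRankA c h i ≤ t.foldl (fun m h => max m (pvRankA c h i)) (pvRankA c h i) := hle _
      by_cases h2 : pvRankA c h i < t.foldl (fun m h => max m (pvRankA c h i)) (pvRankA c h i)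
      · rw [if_pos h2, if_pos (by omega)]
        rw [List.filter_cons_of_neg (by simp; omega)]
      · rw [if_neg h2, if_pos (by omega)]
        have he : t.foldl (fun m h => max m (pvRankA c h i)) (pvRankA c h i) = pvRankA c h i := by omega
        rw [he]
        rw [List.filter_cons_of_pos (by simp)]
        simp
    · rw [if_neg h1]
      by_cases h2 : pvRankA c h i = b
      · rw [if_pos h2]
        rw [ih]
        have hmax : max b (pvRankA c h i) = b := by omega
        rw [hmax]
        by_cases h3 : b < t.foldl (fun m h => max m (pvRankA c h i)) b
        · rw [if_pos h3, if_pos h3]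
          rw [List.filter_cons_of_neg (by simp; omega)]
        · rw [if_neg h3, if_neg h3]
          rw [List.filter_cons_of_pos (by simp [h2])]
          simp
      · rw [if_neg h2]
        rw [ih]
        have hmax : max b (pvRankA c h i) = b := by omega
        rw [hmax]
        by_cases h3 : b < t.foldl (fun m h => max m (pvRankA c h i)) b
        · rw [if_pos h3, if_pos h3]
          rw [List.filter_cons_of_neg (by simp; omega)]
        · rw [if_neg h3, if_neg h3]
          rw [List.filter_cons_of_neg (by simp [h2])]

theorem pvInnerA_snd (c : List (Int × List (List Int))) (i : Int) (hands : List Int) :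
    (pvInnerA c i hands).2 = hands.filter (fun h => pvRankA c h i == pvMax c i hands) := by
  unfold pvInnerA
  rw [PySem.List.foldl_pyRange_zero_pyGetD' hands 0
    (fun st h =>
      if pvRankA c h i > st.1 then (pvRankA c h i, [h])
      else if pvRankA c h i = st.1 then (st.1, st.2 ++ [h])
      else st) ((0:Int), ([]:List Int))]
  rw [pvFoldA]
  unfold pvMax
  have h0 : (0:Int) ≤ hands.foldl (fun m h => max m (pvRankA c h i)) 0 :=
    (PySem.List.le_foldl_max_int hands (fun h => pvRankA c h i) 0).1
  by_cases h1 : (0:Int) < hands.foldl (fun m h => max m (pvRankA c h i)) 0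
  · rw [if_pos h1]
  · rw [if_neg h1]
    have he : hands.foldl (fun m h => max m (pvRankA c h i)) 0 = 0 := by omega
    rw [he]
    simp

theorem pvRank_le_max (c : List (Int × List (List Int))) (i : Int) (hands : List Int)
    (h : Int) (hh : h ∈ hands) : pvRankA c h i ≤ pvMax c i hands :=
  (PySem.List.le_foldl_max_int hands (fun h => pvRankA c h i) 0).2 h hh

theorem pvMax_attained (c : List (Int × List (List Int))) (i : Int) (hands : List Int)
    (hne : hands ≠ []) : ∃ g ∈ hands, pvRankA c g i = pvMax c i hands := by
  have hmem := PySem.List.foldl_max_mem (hands.map (fun h => pvRankA c h i)) 0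
  rw [List.foldl_map] at hmem
  rcases hmem with h0 | hm
  · cases hands with
    | nil => exact absurd rfl hne
    | cons a t =>
      refine ⟨a, List.mem_cons_self, ?_⟩
      have hle := pvRank_le_max c i (a :: t) a List.mem_cons_self
      have hnn := pvRankA_nonneg c a i
      unfold pvMax at *
      omega
  · rcases List.mem_map.mp hm with ⟨g, hg, he⟩
    exact ⟨g, hg, he⟩

theorem pvLexLt_cons_eq_false_iff (x y : Int) (xs ys : List Int) :
    pvLexLt (x :: xs) (y :: ys) = false ↔ (y < x ∨ (x = y ∧ pvLexLt xs ys = false)) := by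
  rw [← Bool.not_eq_true, pvLexLt_cons_iff]
  constructor
  · intro hn
    push Not at hn
    rcases hn with ⟨h1, h2⟩
    by_cases he : x = y
    · right; exact ⟨he, by simpa using h2 he⟩
    · left; omega
  · intro hn
    push Not
    rcases hn with h | ⟨he, hf⟩
    · exact ⟨by omega, fun he => absurd he (by omega)⟩
    · exact ⟨by omega, fun _ => by simpa using hf⟩

theorem pvMaximal_decomp (c : List (Int × List (List Int))) (f : Nat) (i : Int)
    (hands : List Int) (h : Int) (hh : h ∈ hands) :
    pvMaximal (pvKey c (f+1) i) hands h
      = ((pvRankA c h i == pvMax c i hands)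
          && pvMaximal (pvKey c f (i+1)) (hands.filter (fun g => pvRankA c g i == pvMax c i hands)) h) := by
  rw [Bool.eq_iff_iff]
  simp only [pvMaximal, List.all_eq_true, Bool.and_eq_true, beq_iff_eq, Bool.not_eq_eq_eq_not,
    Bool.not_true, List.mem_filter]
  constructor
  · intro H
    obtain ⟨g0, hg0, hg0M⟩ := pvMax_attained c i hands (by rintro rfl; simp at hh)
    have hhle := pvRank_le_max c i hands h hh
    have hM : pvRankA c h i = pvMax c i hands := by
      have := H g0 hg0
      simp only [pvKey, pvLexLt_cons_eq_false_iff, hg0M] at this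
      omega
    refine ⟨hM, ?_⟩
    intro g hg
    have := H g hg.1
    simp only [pvKey, pvLexLt_cons_eq_false_iff, hM, hg.2] at this
    rcases this with h1 | ⟨_, h2⟩
    · omega
    · exact h2
  · rintro ⟨hM, H⟩ g hg
    have hgle := pvRank_le_max c i hands g hg
    simp only [pvKey, pvLexLt_cons_eq_false_iff, hM]
    by_cases he : pvRankA c g i = pvMax c i hands
    · right; exact ⟨by omega, H g ⟨hg, he⟩⟩
    · left; omega

theorem pvLoopA_filter (c : List (Int × List (List Int))) :
    ∀ (f : Nat) (i : Int) (hands : List Int),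
      pvLoopA c f i hands = hands.filter (pvMaximal (pvKey c f i) hands) := by
  intro f
  induction f with
  | zero =>
    intro i hands
    simp only [pvLoopA, pvKey]
    exact (List.filter_eq_self.mpr (fun x _ => by simp [pvMaximal, pvLexLt])).symm
  | succ f ih =>
    intro i hands
    simp only [pvLoopA, pvInnerA_snd]
    have hdecomp : hands.filter (pvMaximal (pvKey c (f+1) i) hands)
        = (hands.filter (fun g => pvRankA c g i == pvMax c i hands)).filter
            (pvMaximal (pvKey c f (i+1)) (hands.filter (fun g => pvRankA c g i == pvMax c i hands))) := by
      rw [List.filter_congr (fun x hx => pvMaximal_decomp c f i hands x hx)]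
      rw [List.filter_filter]
      apply List.filter_congr
      intro x hx
      simp [Bool.and_comm]
    rw [hdecomp]
    by_cases h1 : (hands.filter (fun g => pvRankA c g i == pvMax c i hands)).length = 1
    · rw [if_pos h1]
      obtain ⟨x, hx⟩ := List.length_eq_one_iff.mp h1
      rw [hx]
      simp [pvMaximal, pvLexLt_irrefl]
    · rw [if_neg h1]
      exact ih (i+1) _

theorem pvKeyB_eq (c : List (Int × List (List Int))) (h : Int) : pvKeyB c h = pvKey c 5 0 h := by
  have hr : PySem.List.pyRange 0 5 1 = [0, 1, 2, 3, 4] := by decide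
  simp only [pvKeyB, hr, List.map_cons, List.map_nil]
  rfl

theorem pvFoldBest (l : List (List Int)) :
    ∀ (m : List Int),
      ((l.foldl (fun m k => if pvLexLt m k then k else m) m = m)
        ∨ (l.foldl (fun m k => if pvLexLt m k then k else m) m ∈ l))
      ∧ ∀ k, (k = m ∨ k ∈ l) → pvLexLt (l.foldl (fun m k => if pvLexLt m k then k else m) m) k = false := by
  induction l with
  | nil =>
    intro m
    refine ⟨Or.inl rfl, ?_⟩
    rintro k (rfl | hk)
    · simp [pvLexLt_irrefl]
    · simp at hk
  | cons k0 t ih =>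
    intro m
    simp only [List.foldl_cons]
    by_cases h0 : pvLexLt m k0
    · rw [if_pos h0]
      rcases ih k0 with ⟨hmem, hmax⟩
      constructor
      · rcases hmem with he | hm
        · right; rw [he]; exact List.mem_cons_self
        · right; exact List.mem_cons_of_mem _ hm
      · rintro k (rfl | hk)
        · -- ¬ lexLt fold m : fold ≽ k0 ≻ m
          by_contra hc
          have hfk : pvLexLt (t.foldl (fun m k => if pvLexLt m k then k else m) k0) k = true := by
            simpa using hc
          have := pvLexLt_trans _ _ _ hfk h0
          have hk0 := hmax k0 (Or.inl rfl)
          rw [this] at hk0; exact Bool.true_eq_false.mp hk0 |>.elim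
        · rcases List.mem_cons.mp hk with rfl | hk
          · exact hmax k (Or.inl rfl)
          · exact hmax k (Or.inr hk)
    · rw [if_neg h0]
      rcases ih m with ⟨hmem, hmax⟩
      constructor
      · rcases hmem with he | hm
        · left; exact he
        · right; exact List.mem_cons_of_mem _ hm
      · rintro k (rfl | hk)
        · exact hmax k (Or.inl rfl)
        · rcases List.mem_cons.mp hk with rfl | hk
          · -- ¬ lexLt fold k0, given ¬ lexLt m k0 and ¬ lexLt fold m
            by_contra hc
            have hfk : pvLexLt (t.foldl (fun m k => if pvLexLt m k then k else m) m) k = true := by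
              simpa using hc
            have hfm := hmax m (Or.inl rfl)
            rcases pvLexLt_tri (t.foldl (fun m k => if pvLexLt m k then k else m) m) m with h1 | h1 | h1
            · rw [h1] at hfm; exact (Bool.true_eq_false.mp hfm).elim
            · rw [h1] at hfk; rw [hfk] at h0; exact h0 rfl
            · have := pvLexLt_trans _ _ _ h1 hfk
              rw [this] at h0; exact h0 rfl
          · exact hmax k (Or.inr hk)

theorem pvZipFilterMap (K : Int → List Int) (best : List Int) :
    ∀ (l : List Int),
      ((l.zip (l.map K)).filterMap (fun hk => if hk.2 = best then some hk.1 else none))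
        = l.filter (fun h => K h == best) := by
  intro l
  induction l with
  | nil => rfl
  | cons a t ih =>
    simp only [List.map_cons, List.zip_cons_cons, List.filterMap_cons, List.filter_cons]
    by_cases hb : K a = best
    · rw [if_pos hb, ih]
      simp [hb]
    · rw [if_neg hb, ih]
      simp [hb]

theorem pvAlt_filter (hands : List Int) (c : List (Int × List (List Int))) :
    clarify_winner_alt hands c = hands.filter (pvMaximal (pvKeyB c) hands) := by
  cases hands with
  | nil => rfl
  | cons h0 hs =>
    simp only [clarify_winner_alt, List.map_cons]
    rw [show pvKeyB c h0 :: List.map (pvKeyB c) hs = List.map (pvKeyB c) (h0 :: hs) from rfl, pvZipFilterMap]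
    apply List.filter_congr
    intro h hh
    rcases pvFoldBest (hs.map (pvKeyB c)) (pvKeyB c h0) with ⟨hmem, hmax⟩
    set best := (hs.map (pvKeyB c)).foldl (fun m k => if pvLexLt m k then k else m) (pvKeyB c h0) with hbest
    have hbmem : ∃ g ∈ h0 :: hs, best = pvKeyB c g := by
      rcases hmem with he | hm
      · exact ⟨h0, List.mem_cons_self, he⟩
      · rcases List.mem_map.mp hm with ⟨g, hg, he⟩
        exact ⟨g, List.mem_cons_of_mem _ hg, he.symm⟩
    have hbmax : ∀ g ∈ h0 :: hs, pvLexLt best (pvKeyB c g) = false := by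
      intro g hg
      rcases List.mem_cons.mp hg with rfl | hg
      · exact hmax _ (Or.inl rfl)
      · exact hmax _ (Or.inr (List.mem_map_of_mem hg))
    rw [Bool.eq_iff_iff]
    simp only [beq_iff_eq, pvMaximal, List.all_eq_true, Bool.not_eq_eq_eq_not, Bool.not_true]
    constructor
    · intro he g hg
      rw [he]
      exact hbmax g hg
    · intro H
      obtain ⟨gb, hgb, hgbe⟩ := hbmem
      have h1 : pvLexLt (pvKeyB c h) best = false := by rw [hgbe]; exact H gb hgb
      have h2 : pvLexLt best (pvKeyB c h) = false := hbmax h hh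
      rcases pvLexLt_tri (pvKeyB c h) best with ht | ht | ht
      · rw [ht] at h1; exact (Bool.true_eq_false.mp h1).elim
      · exact ht
      · rw [ht] at h2; exact (Bool.true_eq_false.mp h2).elim

-- ===== VERDICT (by name: the statement is the Claim_ definition above) =====
theorem clarify_winner_spec : Claim_equal_clarify_winner := by
  intro hands c _ _
  unfold Spec_clarify_winner clarify_winner
  rw [pvAlt_filter, pvLoopA_filter]
  apply List.filter_congr
  intro h _
  simp [pvMaximal, pvKeyB_eq]
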